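-- pv_equiv track=rewrite | github.com/giannislelekas/CS4035 | lab2/helper_functions/comparison_helper_functions.py | attack_detection
-- ===== SOURCE A (Python) =====
-- def attack_detection(test_labels):
--     num_attacks=0
--     attack_duration = []
--     attack_start = []
--     pos=test_labels[0]
--     dur = 0
--     ind = 1
--
--     if pos==1:
--         dur = 1
--         attack_start.append(ind)
--
--     for y in test_labels[1:]:
--         ind = ind+1
--         if y==1:
--             dur = dur + 1
--             if pos==0:
--                 pos=1
--                 attack_start.append(ind)
--         else:
--             if pos==1:
--                 pos=0
--                 num_attacks=num_attacks+1
--                 attack_duration.append(dur)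
--                 dur = 0
--     return num_attacks, attack_start, attack_duration
-- ===== SOURCE B (Python) =====
-- from itertools import groupby
--
--
-- def attack_detection(test_labels):
--     # Collapse the label stream into runs of attack / non-attack labels, then
--     # scan the runs: each attack run contributes a start index, and each attack
--     # run that is already closed (i.e. not the final run, which may still be
--     # ongoing when the trace ends) contributes a completed attack with its
--     # duration.
--     runs = [(key, len(list(grp))) for key, grp in groupby(test_labels, key=lambda x: x == 1)]
--     num_attacks = 0
--     attack_start = []
--     attack_duration = []
--     pos = 1
--     for i, (is_attack, length) in enumerate(runs):
--         if is_attack: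
--             attack_start.append(pos)
--             if i < len(runs) - 1:
--                 num_attacks += 1
--                 attack_duration.append(length)
--         pos += length
--     return num_attacks, attack_start, attack_duration
-- ===== Notes on version B (the rewrite author's own statement) =====
-- stated objective: alternative
-- what changed: Replaces A's element-by-element pos/dur state machine with a run-length decomposition: itertools.groupby collapses the labels into (is_attack, length) runs, and one pass over the runs records each attack run's start and, for every closed (non-final) run, its count and duration.
-- intended difference: When the first label is neither 0 nor 1 and a 1 appears later, A's state machine is stuck in an unrecognised state and returns (0, [], []) despite the attack labels, while B detects the attack runs normally; B's value is the intended one. — e.g. on attack_detection([2, 1]): A returns (0, [], []), B returns (0, [2], [])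
import Mathlib
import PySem

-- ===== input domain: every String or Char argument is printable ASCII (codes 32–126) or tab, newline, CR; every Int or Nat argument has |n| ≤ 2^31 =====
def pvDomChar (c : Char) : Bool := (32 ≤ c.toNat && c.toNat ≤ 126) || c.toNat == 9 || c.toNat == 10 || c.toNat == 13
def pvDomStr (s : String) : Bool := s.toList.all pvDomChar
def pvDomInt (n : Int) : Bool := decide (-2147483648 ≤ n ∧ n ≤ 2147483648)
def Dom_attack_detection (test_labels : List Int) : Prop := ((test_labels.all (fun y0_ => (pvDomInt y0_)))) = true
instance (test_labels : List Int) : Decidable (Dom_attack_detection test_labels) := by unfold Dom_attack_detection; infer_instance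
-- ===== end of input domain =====

-- B re-implements A by run-length grouping (itertools.groupby) plus one pass over the
-- runs; same O(n) cost, different decomposition; where A's stuck state machine misses
-- attacks (leading label not 0/1), B detects them (see D_).  Return values only.

-- ===== PORT A =====
-- one iteration of A's for-loop; state = (num_attacks, attack_start, attack_duration, pos, dur, ind)
def adStep (st : Int × List Int × List Int × Int × Int × Int) (y : Int) :
    Int × List Int × List Int × Int × Int × Int :=
  let (num, starts, durs, pos, dur, ind) := st
  let ind := ind + 1
  if y == 1 then
    if pos == 0 then (num, starts ++ [ind], durs, 1, dur + 1, ind)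
    else (num, starts, durs, pos, dur + 1, ind)
  else
    if pos == 1 then (num + 1, starts, durs ++ [dur], 0, 0, ind)
    else (num, starts, durs, pos, dur, ind)

def attack_detection (test_labels : List Int) : Int × List Int × List Int :=
  match test_labels with
  | [] => (0, [], [])   -- Python raises IndexError on test_labels[0]; excluded by Pre_
  | x :: rest =>        -- x = test_labels[0], rest = test_labels[1:]
    let pos : Int := x
    let init : Int × List Int × List Int × Int × Int × Int :=
      if pos == 1 then (0, [1], [], pos, 1, 1) else (0, [], [], pos, 0, 1)
    let r := rest.foldl adStep init
    (r.1, r.2.1, r.2.2.1)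

-- ===== PORT B =====
-- itertools.groupby over the (x == 1) key, as (key, group length) pairs
def groupRun (cur : Bool) (n : Int) : List Bool → List (Bool × Int)
  | [] => [(cur, n)]
  | b :: bs => if b == cur then groupRun cur (n + 1) bs else (cur, n) :: groupRun b 1 bs

def groupsOf : List Bool → List (Bool × Int)
  | [] => []
  | b :: bs => groupRun b 1 bs

-- one iteration of B's for-loop over enumerate(runs); n = len(runs);
-- state = (num_attacks, attack_start, attack_duration, pos)
def bStep (n : Int) (st : Int × List Int × List Int × Int) (ig : Int × Bool × Int) :
    Int × List Int × List Int × Int :=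
  let (num, starts, durs, pos) := st
  let i := ig.1
  let is_attack := ig.2.1
  let length := ig.2.2
  if is_attack then
    if i < n - 1 then (num + 1, starts ++ [pos], durs ++ [length], pos + length)
    else (num, starts ++ [pos], durs, pos + length)
  else (num, starts, durs, pos + length)

def attack_detection_alt (test_labels : List Int) : Int × List Int × List Int :=
  let runs := groupsOf (test_labels.map (fun x => x == 1))
  let r := (PySem.List.enumerate runs).foldl (bStep (runs.length : Int)) (0, [], [], 1)
  (r.1, r.2.1, r.2.2.1)

-- ===== PRECONDITION & SPEC =====
-- Pre_ excludes only the empty list, on which A raises IndexError (test_labels[0]).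
def Pre_attack_detection (test_labels : List Int) : Prop := test_labels ≠ []
instance (test_labels : List Int) : Decidable (Pre_attack_detection test_labels) := by
  unfold Pre_attack_detection; infer_instance
def pvWitness_attack_detection : List Int := [1, 0]

-- When the first label is neither 0 nor 1 and a 1 appears later, A's state machine is
-- stuck in an unrecognised state and returns (0, [], []) despite the attack labels,
-- while B detects the attack runs normally; B's value is the intended one.
def D_attack_detection (test_labels : List Int) : Prop :=
  test_labels.headI ≠ 0 ∧ test_labels.headI ≠ 1 ∧ (1 : Int) ∈ test_labels.tail
instance (test_labels : List Int) : Decidable (D_attack_detection test_labels) := by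
  unfold D_attack_detection; infer_instance

def Spec_attack_detection (test_labels : List Int) (out : Int × List Int × List Int) : Prop :=
  ¬ D_attack_detection test_labels → out = attack_detection_alt test_labels
instance (test_labels : List Int) (out : Int × List Int × List Int) :
    Decidable (Spec_attack_detection test_labels out) := by
  unfold Spec_attack_detection; infer_instance

def pvDiffWitness_attack_detection : List Int := [2, 1]
def pvDiffWitnessOut_attack_detection :
    (Int × List Int × List Int) × (Int × List Int × List Int) :=
  ((0, [], []), (0, [2], []))

-- ===== CLAIM (what is proved, stated in full; the proofs are below) =====
def Claim_unchanged_attack_detection : Prop := ∀ (test_labels : List Int), Dom_attack_detection test_labels → Pre_attack_detection test_labels → Spec_attack_detection test_labels (attack_detection test_labels)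
def Claim_changed_attack_detection : Prop := Dom_attack_detection (pvDiffWitness_attack_detection) ∧ Pre_attack_detection (pvDiffWitness_attack_detection) ∧ D_attack_detection (pvDiffWitness_attack_detection) ∧ attack_detection (pvDiffWitness_attack_detection) = pvDiffWitnessOut_attack_detection.1 ∧ attack_detection_alt (pvDiffWitness_attack_detection) = pvDiffWitnessOut_attack_detection.2 ∧ pvDiffWitnessOut_attack_detection.1 ≠ pvDiffWitnessOut_attack_detection.2
def Claim_exact_attack_detection : Prop := ∀ (test_labels : List Int), Dom_attack_detection test_labels → Pre_attack_detection test_labels → D_attack_detection test_labels → attack_detection test_labels ≠ attack_detection_alt test_labels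

-- ===== LEMMAS AND PROOFS =====

-- canonical run recursion (proof-only bridge between the two ports):
-- canon bs off = result of scanning bs when currently outside an attack run, next 1-based
-- index off; canonRun bs off d = the same inside an open run of accumulated duration d.
mutual
def canonRun : List Bool → Int → Int → Int × List Int × List Int
  | [], _, _ => (0, [], [])                          -- trailing open run: start only
  | true :: bs, off, d => canonRun bs (off + 1) (d + 1)
  | false :: bs, off, d =>
    let r := canon bs (off + 1)
    (r.1 + 1, r.2.1, d :: r.2.2)
def canon : List Bool → Int → Int × List Int × List Int
  | [], _ => (0, [], [])
  | false :: bs, off => canon bs (off + 1)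
  | true :: bs, off =>
    let r := canonRun bs (off + 1) 1
    (r.1, off :: r.2.1, r.2.2)
end

-- adStep written out with plain if-then-else conditions
theorem adStep_spec (num : Int) (st du : List Int) (pos dur ind y : Int) :
    adStep (num, st, du, pos, dur, ind) y =
      if y = 1 then
        (if pos = 0 then (num, st ++ [ind + 1], du, 1, dur + 1, ind + 1)
         else (num, st, du, pos, dur + 1, ind + 1))
      else
        (if pos = 1 then (num + 1, st, du ++ [dur], 0, 0, ind + 1)
         else (num, st, du, pos, dur, ind + 1)) := by
  simp only [adStep, beq_iff_eq]

-- A's loop is stuck when pos is neither 0 nor 1: only dur and ind change.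
theorem stuckA (xs : List Int) (num : Int) (st du : List Int) (pos : Int)
    (h0 : pos ≠ 0) (h1 : pos ≠ 1) :
    ∀ (dur ind : Int), ∃ d',
      xs.foldl adStep (num, st, du, pos, dur, ind) = (num, st, du, pos, d', ind + xs.length) := by
  induction xs with
  | nil => intro dur ind; exact ⟨dur, by simp⟩
  | cons y ys ih =>
    intro dur ind
    by_cases hy : y = 1
    · obtain ⟨d', hd⟩ := ih (dur + 1) (ind + 1)
      refine ⟨d', ?_⟩
      rw [List.foldl_cons, adStep_spec, if_pos hy, if_neg h0, hd]
      simp only [Prod.ext_iff, List.length_cons]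
      refine ⟨?_, ?_, ?_, ?_, ?_, ?_⟩ <;> first | rfl | (push_cast; omega) | simp
    · obtain ⟨d', hd⟩ := ih dur (ind + 1)
      refine ⟨d', ?_⟩
      rw [List.foldl_cons, adStep_spec, if_neg hy, if_neg h1, hd]
      simp only [Prod.ext_iff, List.length_cons]
      refine ⟨?_, ?_, ?_, ?_, ?_, ?_⟩ <;> first | rfl | (push_cast; omega) | simp

-- A's loop computes canon/canonRun of the (· == 1) image of the remaining labels.
theorem loopA (xs : List Int) :
    (∀ (num : Int) (st du : List Int) (ind : Int),
      ∃ p d', xs.foldl adStep (num, st, du, 0, 0, ind) =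
        (num + (canon (xs.map (· == 1)) (ind + 1)).1,
         st ++ (canon (xs.map (· == 1)) (ind + 1)).2.1,
         du ++ (canon (xs.map (· == 1)) (ind + 1)).2.2, p, d', ind + xs.length)) ∧
    (∀ (num : Int) (st du : List Int) (dur ind : Int),
      ∃ p d', xs.foldl adStep (num, st, du, 1, dur, ind) =
        (num + (canonRun (xs.map (· == 1)) (ind + 1) dur).1,
         st ++ (canonRun (xs.map (· == 1)) (ind + 1) dur).2.1,
         du ++ (canonRun (xs.map (· == 1)) (ind + 1) dur).2.2, p, d', ind + xs.length)) := by
  induction xs with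
  | nil => exact ⟨fun num st du ind => ⟨0, 0, by simp [canon]⟩,
                  fun num st du dur ind => ⟨1, dur, by simp [canonRun]⟩⟩
  | cons y ys ih =>
    constructor
    · intro num st du ind
      by_cases hy : y = 1
      · obtain ⟨p, d', h⟩ := ih.2 num (st ++ [ind + 1]) du 1 (ind + 1)
        refine ⟨p, d', ?_⟩
        rw [List.foldl_cons, adStep_spec, if_pos hy, if_pos rfl, show (0 : Int) + 1 = 1 from rfl, h]
        have hmap : (y :: ys).map (· == 1) = true :: ys.map (· == 1) := by simp [hy]
        rw [hmap]
        simp only [canon, Prod.ext_iff, List.length_cons]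
        refine ⟨?_, ?_, ?_, ?_, ?_, ?_⟩ <;> first | rfl | (push_cast; omega) | simp
      · obtain ⟨p, d', h⟩ := ih.1 num st du (ind + 1)
        refine ⟨p, d', ?_⟩
        rw [List.foldl_cons, adStep_spec, if_neg hy, if_neg (by norm_num : (0 : Int) ≠ 1), h]
        have hmap : (y :: ys).map (· == 1) = false :: ys.map (· == 1) := by simp [hy]
        rw [hmap]
        simp only [canon, Prod.ext_iff, List.length_cons]
        refine ⟨?_, ?_, ?_, ?_, ?_, ?_⟩ <;> first | rfl | (push_cast; omega) | simp
    · intro num st du dur ind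
      by_cases hy : y = 1
      · obtain ⟨p, d', h⟩ := ih.2 num st du (dur + 1) (ind + 1)
        refine ⟨p, d', ?_⟩
        rw [List.foldl_cons, adStep_spec, if_pos hy, if_neg (by norm_num : (1 : Int) ≠ 0), h]
        have hmap : (y :: ys).map (· == 1) = true :: ys.map (· == 1) := by simp [hy]
        rw [hmap]
        simp only [canonRun, Prod.ext_iff, List.length_cons]
        refine ⟨?_, ?_, ?_, ?_, ?_, ?_⟩ <;> first | rfl | (push_cast; omega) | simp
      · obtain ⟨p, d', h⟩ := ih.1 (num + 1) st (du ++ [dur]) (ind + 1)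
        refine ⟨p, d', ?_⟩
        rw [List.foldl_cons, adStep_spec, if_neg hy, if_pos rfl, h]
        have hmap : (y :: ys).map (· == 1) = false :: ys.map (· == 1) := by simp [hy]
        rw [hmap]
        simp only [canonRun, Prod.ext_iff, List.length_cons]
        refine ⟨?_, ?_, ?_, ?_, ?_, ?_⟩ <;> first | rfl | (push_cast; omega) | simp

-- A = canon when the first label is 0 or 1.
theorem A_eq_canon (x : Int) (rest : List Int) (hx : x = 0 ∨ x = 1) :
    attack_detection (x :: rest) = canon ((x :: rest).map (· == 1)) 1 := by
  rcases hx with hx | hx <;> subst hx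
  · obtain ⟨p, d', h⟩ := (loopA rest).1 0 [] [] 1
    norm_num at h
    norm_num [attack_detection, h, canon]
    rw [show ((0 : Int) == 1) = false from rfl]
    simp [canon]
  · obtain ⟨p, d', h⟩ := (loopA rest).2 0 [1] [] 1 1
    norm_num at h
    norm_num [attack_detection, h, canon]

-- A is stuck (returns (0,[],[])) when the head is neither 0 nor 1
theorem A_stuck (x : Int) (rest : List Int) (h0 : x ≠ 0) (h1 : x ≠ 1) :
    attack_detection (x :: rest) = (0, [], []) := by
  obtain ⟨d', hd⟩ := stuckA rest 0 [] [] x h0 h1 0 1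
  simp only [attack_detection, beq_iff_eq, h1, if_false, hd]

-- run-level recursion matching B's one pass over the runs
def canonG : List (Bool × Int) → Int → Int × List Int × List Int
  | [], _ => (0, [], [])
  | (false, l) :: gs, off => canonG gs (off + l)
  | (true, l) :: gs, off =>
    if gs = [] then (0, [off], [])
    else
      let r := canonG gs (off + l)
      (r.1 + 1, off :: r.2.1, l :: r.2.2)

-- B's single forward fold over enumerate(runs) computes canonG.
theorem bfold (G : List (Bool × Int)) :
    ∀ (k n : Int), n = k + G.length →
    ∀ (num : Int) (st du : List Int) (pos : Int),
      (PySem.List.enumerate G k).foldl (bStep n) (num, st, du, pos) =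
        (num + (canonG G pos).1, st ++ (canonG G pos).2.1, du ++ (canonG G pos).2.2,
          pos + (G.map (·.2)).sum) := by
  induction G with
  | nil => intro k n hn num st du pos; simp [PySem.List.enumerate_nil, canonG]
  | cons g gs ih =>
    intro k n hn num st du pos
    obtain ⟨b, l⟩ := g
    rw [PySem.List.enumerate_cons, List.foldl_cons]
    have hlen : n = (k + 1) + gs.length := by
      rw [hn]; push_cast [List.length_cons]; ring
    cases b
    · rw [show bStep n (num, st, du, pos) (k, false, l) = (num, st, du, pos + l) from rfl]
      rw [ih (k + 1) n hlen num st du (pos + l)]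
      rw [show canonG ((false, l) :: gs) pos = canonG gs (pos + l) from rfl]
      simp only [List.map_cons, List.sum_cons, Prod.mk.injEq]
      refine ⟨trivial, trivial, trivial, by ring⟩
    · rw [show bStep n (num, st, du, pos) (k, true, l) =
          (if k < n - 1 then (num + 1, st ++ [pos], du ++ [l], pos + l)
           else (num, st ++ [pos], du, pos + l)) from rfl]
      by_cases hgs : gs = []
      · subst hgs
        have hc : ¬ (k < n - 1) := by rw [hn]; simp
        rw [if_neg hc]
        simp [PySem.List.enumerate_nil, canonG]
      · have hc : k < n - 1 := by
          have : gs.length ≠ 0 := by simpa [List.length_eq_zero_iff] using hgs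
          rw [hn]; push_cast [List.length_cons]; omega
        rw [if_pos hc]
        rw [ih (k + 1) n hlen (num + 1) (st ++ [pos]) (du ++ [l]) (pos + l)]
        simp only [canonG, if_neg hgs, List.map_cons, List.sum_cons, Prod.mk.injEq]
        refine ⟨by ring, by simp, by simp, by ring⟩

-- groupRun never returns the empty list
theorem groupRun_ne_nil (bs : List Bool) : ∀ cur n, groupRun cur n bs ≠ [] := by
  induction bs with
  | nil => intro cur n; simp [groupRun]
  | cons b bs ih =>
    intro cur n
    by_cases h : b = cur <;> simp [groupRun, h, ih]

-- canonG over the grouped runs equals canon/canonRun over the raw elements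
theorem canonG_groupRun (bs : List Bool) :
    (∀ (n off : Int), canonG (groupRun false n bs) off = canon bs (off + n)) ∧
    (∀ (n off : Int), canonG (groupRun true n bs) off =
      ((canonRun bs (off + n) n).1, off :: (canonRun bs (off + n) n).2.1,
        (canonRun bs (off + n) n).2.2)) := by
  induction bs with
  | nil =>
    constructor
    · intro n off; simp [groupRun, canonG, canon]
    · intro n off; simp [groupRun, canonG, canonRun]
  | cons b bs ih =>
    constructor
    · intro n off
      cases b
      · rw [show groupRun false n (false :: bs) = groupRun false (n + 1) bs from by simp [groupRun]]
        rw [ih.1 (n + 1) off]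
        rw [show canon (false :: bs) (off + n) = canon bs (off + n + 1) from rfl]
        ring_nf
      · rw [show groupRun false n (true :: bs) = (false, n) :: groupRun true 1 bs from by simp [groupRun]]
        rw [show canonG ((false, n) :: groupRun true 1 bs) off = canonG (groupRun true 1 bs) (off + n) from rfl]
        rw [ih.2 1 (off + n)]
        rfl
    · intro n off
      cases b
      · rw [show groupRun true n (false :: bs) = (true, n) :: groupRun false 1 bs from by simp [groupRun]]
        have hne := groupRun_ne_nil bs false 1
        rw [show canonG ((true, n) :: groupRun false 1 bs) off =
            ((canonG (groupRun false 1 bs) (off + n)).1 + 1,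
              off :: (canonG (groupRun false 1 bs) (off + n)).2.1,
              n :: (canonG (groupRun false 1 bs) (off + n)).2.2) from by
          simp [canonG, hne]]
        rw [ih.1 1 (off + n)]
        rfl
      · rw [show groupRun true n (true :: bs) = groupRun true (n + 1) bs from by simp [groupRun]]
        rw [ih.2 (n + 1) off]
        rw [show canonRun (true :: bs) (off + n) n = canonRun bs (off + n + 1) (n + 1) from rfl]
        ring_nf

-- canonG over the groups equals canon over the elements
theorem canonG_groupsOf (bs : List Bool) (off : Int) :
    canonG (groupsOf bs) off = canon bs off := by
  cases bs with
  | nil => simp [groupsOf, canonG, canon]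
  | cons b bs =>
    cases b
    · rw [show groupsOf (false :: bs) = groupRun false 1 bs from rfl, (canonG_groupRun bs).1 1 off]
      rfl
    · rw [show groupsOf (true :: bs) = groupRun true 1 bs from rfl, (canonG_groupRun bs).2 1 off]
      rfl

-- B = canon on every input
theorem alt_eq_canon (tl : List Int) :
    attack_detection_alt tl = canon (tl.map (fun y => y == 1)) 1 := by
  rw [show attack_detection_alt tl =
      (((PySem.List.enumerate (groupsOf (tl.map (fun x => x == 1)))).foldl
          (bStep ((groupsOf (tl.map (fun x => x == 1))).length : Int)) (0, [], [], 1)).1,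
        ((PySem.List.enumerate (groupsOf (tl.map (fun x => x == 1)))).foldl
          (bStep ((groupsOf (tl.map (fun x => x == 1))).length : Int)) (0, [], [], 1)).2.1,
        ((PySem.List.enumerate (groupsOf (tl.map (fun x => x == 1)))).foldl
          (bStep ((groupsOf (tl.map (fun x => x == 1))).length : Int)) (0, [], [], 1)).2.2.1) from rfl]
  rw [bfold (groupsOf (tl.map (fun x => x == 1))) 0 _ (by simp) 0 [] [] 1]
  rw [canonG_groupsOf]
  simp

-- canon of an all-false list records nothing
theorem canon_all_false (bs : List Bool) :
    ∀ off : Int, (∀ b ∈ bs, b = false) → canon bs off = (0, [], []) := by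
  induction bs with
  | nil => intro off _; simp [canon]
  | cons b bs ih =>
    intro off h
    have hb : b = false := h b (by simp)
    subst hb
    rw [show canon (false :: bs) off = canon bs (off + 1) from rfl]
    exact ih (off + 1) (fun x hx => h x (by simp [hx]))

-- canon records at least one start when a true element occurs
theorem canon_start_ne_nil (bs : List Bool) :
    ∀ off : Int, true ∈ bs → (canon bs off).2.1 ≠ [] := by
  induction bs with
  | nil => intro off h; simp at h
  | cons b bs ih =>
    intro off h
    cases b
    · have : true ∈ bs := by simpa using h
      rw [show canon (false :: bs) off = canon bs (off + 1) from rfl]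
      exact ih (off + 1) this
    · rw [show canon (true :: bs) off =
          ((canonRun bs (off + 1) 1).1, off :: (canonRun bs (off + 1) 1).2.1,
            (canonRun bs (off + 1) 1).2.2) from rfl]
      simp

-- ===== VERDICT =====
theorem attack_detection_spec : Claim_unchanged_attack_detection := by
  intro tl _ hpre hnd
  match tl, hpre with
  | x :: rest, _ =>
    show attack_detection (x :: rest) = attack_detection_alt (x :: rest)
    by_cases hx : x = 0 ∨ x = 1
    · rw [A_eq_canon x rest hx, alt_eq_canon]
    · push Not at hx
      have hmem : (1 : Int) ∉ rest := fun hm =>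
        hnd ⟨by simpa using hx.1, by simpa using hx.2, by simpa using hm⟩
      rw [A_stuck x rest hx.1 hx.2, alt_eq_canon]
      rw [canon_all_false _ 1 ?_]
      intro b hb
      simp only [List.map_cons, List.mem_cons, List.mem_map] at hb
      rcases hb with hb | ⟨y, hy, hb⟩
      · simp [hb, hx.2]
      · rcases Bool.eq_false_or_eq_true b with h | h
        swap
        · exact h
        · exfalso; apply hmem; subst h
          have : y = 1 := by simpa using hb
          rwa [this] at hy
theorem attack_detection_changed : Claim_changed_attack_detection := by
  unfold Claim_changed_attack_detection; decide
theorem attack_detection_tight : Claim_exact_attack_detection := by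
  intro tl _ hpre hd heq
  match tl, hpre with
  | x :: rest, _ =>
    obtain ⟨h0, h1, hm⟩ := hd
    simp only [List.headI, List.tail] at h0 h1 hm
    have hA := A_stuck x rest h0 h1
    have hB := alt_eq_canon (x :: rest)
    have hne : (canon ((x :: rest).map (fun y => y == 1)) 1).2.1 ≠ [] := by
      apply canon_start_ne_nil
      simp only [List.map_cons, List.mem_cons, List.mem_map]
      exact Or.inr ⟨1, hm, rfl⟩
    rw [hA, hB] at heq
    exact hne (congrArg (fun p => p.2.1) heq.symm)
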